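-- pv_equiv track=rewrite | github.com/coinflipatm/itowvms | utils.py | validate_vin
-- ===== SOURCE A (Python) =====
-- def validate_vin(vin):
--     """Validate a vehicle identification number (VIN)"""
--     if not vin or vin == 'N/A':
--         return False
--
--     # Basic validation: 17 characters, no I, O, Q
--     vin = vin.upper()
--     if len(vin) != 17:
--         return False
--
--     if any(c in "IOQ" for c in vin):
--         return False
--
--     # Check for valid characters (alphanumeric except I, O, Q)
--     valid_chars = set("ABCDEFGHJKLMNPRSTUVWXYZ1234567890")
--     if not all(c in valid_chars for c in vin):
--         return False
--
--     return True
-- ===== SOURCE B (Python) =====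
-- def validate_vin(vin):
--     """Validate a vehicle identification number (VIN)"""
--     if not vin or vin == 'N/A':
--         return False
--     # Single fused scan with a countdown: no len(), no full upper(), no sets --
--     # each character is uppercased individually and judged by code-point ranges.
--     need = 17
--     for c in vin:
--         if need == 0:
--             return False
--         u = c.upper()
--         if not ('0' <= u <= '9' or ('A' <= u <= 'Z' and u != 'I' and u != 'O' and u != 'Q')):
--             return False
--         need -= 1
--     return need == 0
-- ===== Notes on version B (the rewrite author's own statement) =====
-- stated objective: alternative
-- what changed: Replaces A's staged passes (whole-string upper, len() test, an any() blacklist scan, then an all() whitelist scan over a set) with one fused left-to-right scan that uppercases each character individually, judges it by code-point range arithmetic instead of set membership, counts down from 17, and exits early on the first bad or surplus character.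
import Mathlib
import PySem

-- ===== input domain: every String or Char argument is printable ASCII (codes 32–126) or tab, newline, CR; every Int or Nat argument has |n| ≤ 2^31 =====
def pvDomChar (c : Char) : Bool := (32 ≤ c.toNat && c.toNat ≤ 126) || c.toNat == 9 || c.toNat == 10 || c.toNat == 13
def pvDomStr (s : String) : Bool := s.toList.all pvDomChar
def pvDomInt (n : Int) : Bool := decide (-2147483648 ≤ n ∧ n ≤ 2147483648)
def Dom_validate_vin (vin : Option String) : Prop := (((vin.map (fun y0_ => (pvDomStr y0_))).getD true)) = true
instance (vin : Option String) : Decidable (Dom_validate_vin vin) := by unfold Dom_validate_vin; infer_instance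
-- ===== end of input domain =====

-- B replaces A's staged passes (whole-string upper, len() test, any() blacklist scan,
-- all() whitelist scan over a set) with one fused scan: per-character upper, code-point
-- range tests, a countdown from 17 and early exit.

-- ===== PORT A =====
def validate_vin (vin : Option String) : Bool :=
  match vin with
  | none => false                                   -- 'not vin' for None
  | some s0 =>
    if s0 == "" || s0 == "N/A" then false           -- 'not vin or vin == "N/A"'
    else
      let v := (PySem.Str.upper s0).toList          -- vin = vin.upper()
      if ¬ (v.length = 17) then false               -- len(vin) != 17
      else if v.any (fun c => PySem.Chars.isIn [c] "IOQ".toList) then false   -- any(c in "IOQ" for c in vin)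
      else
        let valid_chars : PySem.Set Char :=
          PySem.Set.ofList "ABCDEFGHJKLMNPRSTUVWXYZ1234567890".toList
        if ¬ (v.all (fun c => PySem.Set.contains valid_chars c)) then false   -- not all(c in valid_chars ...)
        else true

-- ===== PORT B =====
-- the 'for c in vin' loop of Source B: countdown + per-char range test, early exit
def vinScan : List Char → Nat → Bool
  | [], need => need == 0                                          -- 'return need == 0'
  | c :: rest, need =>
    if need == 0 then false                                        -- surplus character
    else
      let u := PySem.Chars.upperChar c                             -- u = c.upper()
      if !(('0' ≤ u && u ≤ '9') ||
           ('A' ≤ u && u ≤ 'Z' && u != 'I' && u != 'O' && u != 'Q')) then false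
      else vinScan rest (need - 1)

def validate_vin_alt (vin : Option String) : Bool :=
  match vin with
  | none => false
  | some s0 =>
    if s0 == "" || s0 == "N/A" then false
    else vinScan s0.toList 17

-- ===== PRECONDITION & SPEC =====
def Spec_validate_vin (vin : Option String) (out : Bool) : Prop := out = validate_vin_alt vin
instance (vin : Option String) (out : Bool) : Decidable (Spec_validate_vin vin out) := by unfold Spec_validate_vin; infer_instance

-- ===== CLAIM (what is proved, stated in full; the proofs are below) =====
def Claim_equal_validate_vin : Prop := ∀ (vin : Option String), Dom_validate_vin vin → Spec_validate_vin vin (validate_vin vin)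

-- ===== LEMMAS AND PROOFS =====

-- B's character test, as a predicate
def goodB (c : Char) : Bool :=
  let u := PySem.Chars.upperChar c
  ('0' ≤ u && u ≤ '9') || ('A' ≤ u && u ≤ 'Z' && u != 'I' && u != 'O' && u != 'Q')

theorem vinScan_eq (l : List Char) : ∀ n : Nat, vinScan l n = ((l.length == n) && l.all goodB) := by
  induction l with
  | nil => intro n; simp [vinScan, eq_comm]
  | cons c rest ih =>
    intro n
    cases n with
    | zero => simp [vinScan]
    | succ m =>
      by_cases hg : (('0' ≤ PySem.Chars.upperChar c && PySem.Chars.upperChar c ≤ '9') ||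
           ('A' ≤ PySem.Chars.upperChar c && PySem.Chars.upperChar c ≤ 'Z' &&
            PySem.Chars.upperChar c != 'I' && PySem.Chars.upperChar c != 'O' &&
            PySem.Chars.upperChar c != 'Q')) = true
      · simp [vinScan, goodB, hg, ih m]
      · simp only [Bool.not_eq_true] at hg
        simp [vinScan, goodB, hg]

-- A's whitelist excludes I, O, Q
theorem valid_no_ioq (c : Char)
    (h : PySem.Set.contains (PySem.Set.ofList "ABCDEFGHJKLMNPRSTUVWXYZ1234567890".toList) c = true) :
    PySem.Chars.isIn [c] "IOQ".toList = false := by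
  rw [PySem.Set.contains_iff, PySem.Set.mem_ofList] at h
  have h3 : ("ABCDEFGHJKLMNPRSTUVWXYZ1234567890".toList.all
      (fun x => !(PySem.Chars.isIn [x] "IOQ".toList))) = true := by decide
  simpa using List.all_eq_true.mp h3 c h

-- A's if-chain collapses to: length 17 and all characters in the whitelist
theorem A_core (v : List Char) :
    (if ¬ (v.length = 17) then false
     else if v.any (fun c => PySem.Chars.isIn [c] "IOQ".toList) then false
     else if ¬ (v.all (fun c =>
        PySem.Set.contains (PySem.Set.ofList "ABCDEFGHJKLMNPRSTUVWXYZ1234567890".toList) c)) then false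
     else true)
    = ((v.length == 17) && v.all (fun c =>
        PySem.Set.contains (PySem.Set.ofList "ABCDEFGHJKLMNPRSTUVWXYZ1234567890".toList) c)) := by
  by_cases hl : v.length = 17
  · rw [if_neg (not_not_intro hl)]
    have h17 : (v.length == 17) = true := by simpa using hl
    by_cases hall : (v.all (fun c =>
        PySem.Set.contains (PySem.Set.ofList "ABCDEFGHJKLMNPRSTUVWXYZ1234567890".toList) c)) = true
    · have hany : (v.any (fun c => PySem.Chars.isIn [c] "IOQ".toList)) = false := by
        rw [List.any_eq_false]
        intro c hc
        rw [Bool.not_eq_true]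
        exact valid_no_ioq c (List.all_eq_true.mp hall c hc)
      rw [hany, if_neg (by simp), if_neg (not_not_intro hall), h17, hall]
      rfl
    · have hallf : (v.all (fun c =>
          PySem.Set.contains (PySem.Set.ofList "ABCDEFGHJKLMNPRSTUVWXYZ1234567890".toList) c)) = false :=
        Bool.eq_false_iff.mpr hall
      rw [hallf, h17, Bool.true_and]
      by_cases hany : (v.any (fun c => PySem.Chars.isIn [c] "IOQ".toList)) = true
      · rw [if_pos hany]
      · rw [if_neg (by simpa using hany), if_pos (by simp)]
  · rw [if_pos hl]
    have h17 : (v.length == 17) = false := by simpa using hl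
    rw [h17, Bool.false_and]

-- pointwise, for ASCII characters: B's range test on upperChar c agrees with
-- A's whitelist membership applied to upperChar c
set_option maxRecDepth 4000 in
theorem pointwise_fin : ∀ n : Fin 128,
    goodB (Char.ofNat n.val)
      = PySem.Set.contains (PySem.Set.ofList "ABCDEFGHJKLMNPRSTUVWXYZ1234567890".toList)
          (PySem.Chars.upperChar (Char.ofNat n.val)) := by decide

theorem pointwise (c : Char) (h : c.toNat < 128) :
    goodB c = PySem.Set.contains (PySem.Set.ofList "ABCDEFGHJKLMNPRSTUVWXYZ1234567890".toList)
        (PySem.Chars.upperChar c) := by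
  have hc : Char.ofNat c.toNat = c := Char.ofNat_toNat c
  have := pointwise_fin ⟨c.toNat, h⟩
  simpa [hc] using this

theorem dom_lt (c : Char) (h : pvDomChar c = true) : c.toNat < 128 := by
  simp only [pvDomChar, Bool.or_eq_true, Bool.and_eq_true, decide_eq_true_eq, beq_iff_eq] at h
  omega

theorem all_upper_eq (l : List Char) (h : ∀ c ∈ l, pvDomChar c = true) :
    l.all (fun c => PySem.Set.contains
        (PySem.Set.ofList "ABCDEFGHJKLMNPRSTUVWXYZ1234567890".toList) (PySem.Chars.upperChar c))
      = l.all goodB := by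
  induction l with
  | nil => rfl
  | cons c rest ih =>
    simp only [List.all_cons]
    rw [← pointwise c (dom_lt c (h c List.mem_cons_self)),
        ih (fun x hx => h x (List.mem_cons_of_mem c hx))]


-- ===== VERDICT (by name: the statement is the Claim_ definition above) =====
theorem validate_vin_spec : Claim_equal_validate_vin := by
  intro vin hdom
  unfold Spec_validate_vin validate_vin validate_vin_alt
  cases vin with
  | none => rfl
  | some s0 =>
    by_cases hg : (s0 == "" || s0 == "N/A") = true
    · simp [hg]
    · simp only [Bool.not_eq_true] at hg
      simp only [hg, Bool.false_eq_true, if_false]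
      have hdom' : ∀ c ∈ s0.toList, pvDomChar c = true := by
        have : pvDomStr s0 = true := by simpa [Dom_validate_vin] using hdom
        exact List.all_eq_true.mp this
      rw [A_core, vinScan_eq, PySem.Str.toList_upper]
      have hupper : PySem.Chars.upper s0.toList = s0.toList.map PySem.Chars.upperChar := by
        simp [PySem.Chars.upper]
      rw [hupper, List.length_map, List.all_map]
      exact congrArg (s0.toList.length == 17 && ·) (all_upper_eq s0.toList hdom')
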